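-- pv_equiv track=rewrite | github.com/DOF25/HW_3 | sem_3.py | list_fibo
-- ===== SOURCE A (Python) =====
-- def list_fibo(n):
--     fibo = [0, 1]
--     for i in range(2, n + 1):
--         elem = fibo[i-1] + fibo[i - 2]
--         fibo.append(elem)
--     negative_fibo = []
--     for i in range(len(fibo)):
--         elem = (-1) ** (i + 1) * fibo[i]
--         negative_fibo.append(elem)
--     negative_fibo.reverse()
--     return (negative_fibo[:-1] + fibo)
-- ===== SOURCE B (Python) =====
-- def list_fibo(n):
--     length = n + 1 if n >= 1 else 2
--     fib = [0, 1]
--     for _ in range(length - 2):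
--         fib.append(fib[-1] + fib[-2])
--     # negafibonacci: step backward with the pair recurrence, no signs, no mirroring
--     a, b = 0, 1
--     neg = []
--     for _ in range(length - 1):
--         a, b = b - a, a
--         neg.append(a)
--     neg.reverse()
--     return neg + fib
-- ===== Notes on version B (the rewrite author's own statement) =====
-- stated objective: alternative
-- what changed: B builds the negative-index half directly by the negafibonacci pair recurrence (prev = b - a) instead of A's mapping of alternating sign powers over the forward list and slicing off the duplicate zero; the forward list grows by appending from the last two elements rather than indexing by loop counter.
import Mathlib
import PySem

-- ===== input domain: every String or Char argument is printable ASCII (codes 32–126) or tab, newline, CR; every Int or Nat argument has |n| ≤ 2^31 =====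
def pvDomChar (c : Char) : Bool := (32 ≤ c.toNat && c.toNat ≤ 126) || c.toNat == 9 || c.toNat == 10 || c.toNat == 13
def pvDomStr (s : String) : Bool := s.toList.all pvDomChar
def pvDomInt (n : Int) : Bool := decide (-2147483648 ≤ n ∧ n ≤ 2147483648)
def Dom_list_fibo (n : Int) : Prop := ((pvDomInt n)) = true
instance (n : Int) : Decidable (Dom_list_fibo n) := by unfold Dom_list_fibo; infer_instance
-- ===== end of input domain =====

-- B replaces A's sign-power mirroring of the forward list by a direct negafibonacci
-- pair recurrence for the negative half (objective: alternative decomposition, same cost).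

-- ===== PORT A =====
-- indices i-1, i-2 are always in range during A's loop, so the pyGetD default 0 is never used
def list_fibo (n : Int) : List Int :=
  let fibo : List Int :=
    (PySem.List.pyRange 2 (n + 1) 1).foldl
      (fun fibo i =>
        let elem := PySem.List.pyGetD fibo (i - 1) 0 + PySem.List.pyGetD fibo (i - 2) 0
        fibo ++ [elem]) [0, 1]
  let negative_fibo : List Int :=
    (PySem.List.pyRange 0 (fibo.length : Int) 1).foldl
      (fun acc i => acc ++ [(-1) ^ (i + 1).toNat * PySem.List.pyGetD fibo i 0]) []
  let negative_fibo := negative_fibo.reverse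
  PySem.List.slice negative_fibo none (some (-1)) ++ fibo

-- ===== PORT B =====
-- 'for _ in range(length-2): fib.append(fib[-1] + fib[-2])'
def fibGrow (fib : List Int) : Nat → List Int
  | 0 => fib
  | k + 1 =>
      fibGrow (fib ++ [PySem.List.pyGetD fib (-1) 0 + PySem.List.pyGetD fib (-2) 0]) k

-- 'for _ in range(length-1): a, b = b - a, a; neg.append(a)'
def negSteps (a b : Int) : Nat → List Int
  | 0 => []
  | k + 1 => (b - a) :: negSteps (b - a) a k

def list_fibo_alt (n : Int) : List Int :=
  let length : Int := if 1 ≤ n then n + 1 else 2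
  let fib := fibGrow [0, 1] (length - 2).toNat
  let neg := negSteps 0 1 (length - 1).toNat
  neg.reverse ++ fib

-- ===== PRECONDITION & SPEC =====
def Spec_list_fibo (n : Int) (out : List Int) : Prop := out = list_fibo_alt n
instance (n : Int) (out : List Int) : Decidable (Spec_list_fibo n out) := by unfold Spec_list_fibo; infer_instance

-- ===== CLAIM (what is proved, stated in full; the proofs are below) =====
def Claim_equal_list_fibo : Prop := ∀ (n : Int), Dom_list_fibo n → Spec_list_fibo n (list_fibo n)

-- ===== LEMMAS AND PROOFS =====

-- reference Fibonacci
def fibF : Nat → Int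
  | 0 => 0
  | 1 => 1
  | k + 2 => fibF (k + 1) + fibF k

-- signed term A builds: (-1)^(k+1) * F k  (= F(-k), negafibonacci)
def sF (k : Nat) : Int := (-1) ^ (k + 1) * fibF k

theorem fibs_two : (List.range 2).map fibF = [0, 1] := by decide

theorem fibs_succ (L : Nat) :
    (List.range (L + 1)).map fibF = (List.range L).map fibF ++ [fibF L] := by
  simp [List.range_succ]

theorem getD_fibs (L k : Nat) (h : k < L) :
    ((List.range L).map fibF).getD k 0 = fibF k := by
  simp [List.getD_eq_getElem?_getD, List.getElem?_map, List.getElem?_range h]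

-- A's first loop builds the forward Fibonacci list
theorem A_fib (m : Nat) :
    (PySem.List.pyRange 2 (2 + (m : Int)) 1).foldl
      (fun fibo i =>
        fibo ++ [PySem.List.pyGetD fibo (i - 1) 0 + PySem.List.pyGetD fibo (i - 2) 0]) [0, 1]
      = (List.range (m + 2)).map fibF := by
  induction m with
  | zero => simp [PySem.List.pyRange_one_eq_nil]; decide
  | succ m ih =>
    have hsplit : PySem.List.pyRange 2 (2 + ((m : Int) + 1)) 1
        = PySem.List.pyRange 2 (2 + (m : Int)) 1 ++ [2 + (m : Int)] := by
      have := PySem.List.pyRange_one_succ_right (a := 2) (b := 2 + (m : Int)) (by omega)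
      rw [← this]; ring_nf
    push_cast
    rw [hsplit, List.foldl_append, ih]
    simp only [List.foldl_cons, List.foldl_nil]
    have h1 : (2 + (m : Int)) - 1 = ((m + 1 : Nat) : Int) := by omega
    have h2 : (2 + (m : Int)) - 2 = ((m : Nat) : Int) := by omega
    rw [h1, h2, PySem.List.pyGetD_natCast, PySem.List.pyGetD_natCast,
        getD_fibs _ _ (by omega), getD_fibs _ _ (by omega)]
    conv_rhs => rw [show m + 1 + 2 = (m + 2) + 1 from rfl, fibs_succ (m + 2)]
    congr 1

-- A's second loop produces the signed mirror terms
theorem A_neg (L : Nat) (fibo : List Int) (hf : fibo = (List.range L).map fibF) :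
    (PySem.List.pyRange 0 (fibo.length : Int) 1).foldl
      (fun acc i => acc ++ [(-1) ^ (i + 1).toNat * PySem.List.pyGetD fibo i 0]) []
      = (List.range L).map sF := by
  subst hf
  have hlen : (((List.range L).map fibF).length : Int) = (L : Int) := by simp
  rw [hlen, PySem.List.foldl_append_singleton_eq_map, List.nil_append,
      PySem.List.pyRange_zero_nat, List.map_map]
  apply List.map_congr_left
  intro k hk
  have hkL : k < L := List.mem_range.mp hk
  simp only [Function.comp]
  have h1 : (((k : Nat) : Int) + 1).toNat = k + 1 := by omega
  rw [h1, PySem.List.pyGetD_natCast, getD_fibs _ _ hkL, sF]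

-- B's forward loop also builds the forward Fibonacci list
theorem B_fib (k : Nat) : ∀ L : Nat, 2 ≤ L →
    fibGrow ((List.range L).map fibF) k = (List.range (L + k)).map fibF := by
  induction k with
  | zero => intro L _; simp [fibGrow]
  | succ k ih =>
    intro L hL
    rw [fibGrow]
    have hlen : ((List.range L).map fibF).length = L := by simp
    have hm1 : PySem.List.pyGetD ((List.range L).map fibF) (-1) 0 = fibF (L - 1) := by
      rw [PySem.List.pyGetD_neg_ofNat ((List.range L).map fibF) 1 0 (by omega) (by simp only [List.length_map, List.length_range]; omega)]
      simp [hlen, List.getElem_map, List.getElem_range]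
    have hm2 : PySem.List.pyGetD ((List.range L).map fibF) (-2) 0 = fibF (L - 2) := by
      rw [PySem.List.pyGetD_neg_ofNat ((List.range L).map fibF) 2 0 (by omega) (by simp only [List.length_map, List.length_range]; omega)]
      simp [hlen, List.getElem_map, List.getElem_range]
    have hF : fibF (L - 1) + fibF (L - 2) = fibF L := by
      obtain ⟨m, rfl⟩ : ∃ m, L = m + 2 := ⟨L - 2, by omega⟩
      simp [fibF]
    rw [hm1, hm2, hF, ← fibs_succ, ih (L + 1) (by omega),
        show L + 1 + k = L + (k + 1) by omega]

-- the backward pair recurrence produces the signed terms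
theorem sF_step (j : Nat) : sF j - sF (j + 1) = sF (j + 2) := by
  simp only [sF]
  have : fibF (j + 2) = fibF (j + 1) + fibF j := rfl
  rw [this]
  ring

theorem negSteps_eq (k : Nat) : ∀ j : Nat,
    negSteps (sF (j + 1)) (sF j) k = (List.range k).map (fun t => sF (j + 2 + t)) := by
  induction k with
  | zero => intro j; simp [negSteps]
  | succ k ih =>
    intro j
    rw [negSteps, sF_step j]
    have hih := ih (j + 1)
    rw [show (j + 1) + 1 = j + 2 by ring] at hih
    rw [hih, List.range_succ_eq_map, List.map_cons, List.map_map]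
    refine congrArg₂ _ (by norm_num) ?_
    apply List.map_congr_left
    intro t _
    simp only [Function.comp]
    congr 1
    omega

theorem negSteps_zero_one (m : Nat) :
    negSteps 0 1 (m + 1) = (List.range (m + 1)).map (fun t => sF (t + 1)) := by
  rw [negSteps]
  have h0 : (1 : Int) - 0 = sF 1 := by decide
  have h1 : (1 : Int) = sF 1 := by decide
  have h2 : (0 : Int) = sF 0 := by decide
  rw [h0]
  conv_lhs => rw [show negSteps (sF 1) 0 m = negSteps (sF (0 + 1)) (sF 0) m by norm_num [sF, fibF]]
  rw [negSteps_eq m 0, List.range_succ_eq_map, List.map_cons, List.map_map]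
  refine congrArg₂ _ (by decide) ?_
  apply List.map_congr_left
  intro t _
  simp only [Function.comp]
  congr 1
  omega

theorem reverse_dropLast {α : Type} (xs : List α) :
    xs.reverse.dropLast = xs.tail.reverse := by
  cases xs with
  | nil => rfl
  | cons x l => simp

-- ===== VERDICT (by name: the statement is the Claim_ definition above) =====
theorem list_fibo_spec : Claim_equal_list_fibo := by
  intro n _
  unfold Spec_list_fibo
  by_cases h1 : 1 ≤ n
  · obtain ⟨m, rfl⟩ : ∃ m : Nat, n = 1 + (m : Int) := ⟨(n - 1).toNat, by omega⟩
    simp only [list_fibo, list_fibo_alt, if_pos h1]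
    rw [show (1 + (m : Int)) + 1 = 2 + (m : Int) by ring, A_fib m, A_neg (m + 2) _ rfl,
        PySem.List.slice_to_neg_one, reverse_dropLast,
        show (2 + (m : Int) - 2).toNat = m by omega,
        show (2 + (m : Int) - 1).toNat = m + 1 by omega,
        ← fibs_two, B_fib m 2 (by omega), negSteps_zero_one m,
        show 2 + m = m + 2 by omega]
    congr 1
    rw [show m + 2 = (m + 1) + 1 from rfl, List.range_succ_eq_map, List.map_cons,
        List.tail_cons, List.map_map]
    congr 1
  · simp only [list_fibo, list_fibo_alt, if_neg h1]
    rw [PySem.List.pyRange_one_eq_nil (by omega : n + 1 ≤ 2)]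
    decide
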